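-- pv_equiv track=rewrite | github.com/PanJianTing/LeetCode | 1323_Maximum69Number.py | maximum69Number
-- ===== SOURCE A (Python) =====
-- def maximum69Number(num: int) -> int:
--     ans = 0
--     numStr = str(num)
--     count = len(numStr)
--     isChange = False
--
--     for i in range(0,count):
--         if numStr[i] == "6" and isChange == False:
--             ans += 9 * pow(10,count-i-1)
--             isChange = True
--         else:
--             ans += int(numStr[i]) * pow(10,count-i-1)
--     return ans
-- ===== SOURCE B (Python) =====
-- def maximum69Number(num: int) -> int:
--     bump = 0
--     p = 1
--     while p <= num:
--         if num // p % 10 == 6: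
--             bump = 3 * p
--         p *= 10
--     return num + bump
-- ===== Notes on version B (the rewrite author's own statement) =====
-- stated objective: alternative
-- what changed: A parses str(num) digit by digit and re-accumulates the whole number with a power-of-ten per index and a 'changed' flag; B never touches strings: it scans powers of ten arithmetically (num // p % 10), remembers the most significant power whose digit is 6, and returns num + 3*p.
import Mathlib
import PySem

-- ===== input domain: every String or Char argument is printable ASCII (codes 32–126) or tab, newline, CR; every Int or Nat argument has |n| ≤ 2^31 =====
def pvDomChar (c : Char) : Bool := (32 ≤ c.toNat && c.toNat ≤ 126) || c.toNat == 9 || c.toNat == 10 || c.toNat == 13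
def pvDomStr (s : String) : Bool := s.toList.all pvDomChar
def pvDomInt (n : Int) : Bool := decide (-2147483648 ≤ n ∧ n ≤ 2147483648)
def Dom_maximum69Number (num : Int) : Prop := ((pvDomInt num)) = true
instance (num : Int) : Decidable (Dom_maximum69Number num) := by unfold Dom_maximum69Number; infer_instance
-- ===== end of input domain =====

-- B replaces A's string parse-and-accumulate-with-flag loop by pure integer arithmetic:
-- scan powers of ten, remember the most significant one whose digit is 6, return num + 3*p.

-- ===== PORT A =====
def maximum69Number (num : Int) : Int :=
  let numStr := PySem.Int.toChars num
  let count := PySem.List.len numStr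
  let r := (PySem.List.pyRange 0 count 1).foldl
    (fun (st : Int × Bool) i =>
      let c := PySem.List.pyGetD numStr i ' '
      if c = '6' ∧ st.2 = false then
        (st.1 + 9 * 10 ^ ((count - i - 1).toNat), true)
      else
        (st.1 + (PySem.Int.ofChars? [c]).getD 0 * 10 ^ ((count - i - 1).toNat), st.2))
    (0, false)
  r.1

-- ===== PORT B =====
-- the while loop of Source B; the '1 ≤ p' conjunct is a totality guard only (p starts at 1
-- and is only ever multiplied by 10, so it never changes the computed value)
def pvLoopB (num p bump : Int) : Int :=
  if h : 1 ≤ p ∧ p ≤ num then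
    pvLoopB num (p * 10) (if PySem.Int.mod (PySem.Int.floordiv num p) 10 = 6 then 3 * p else bump)
  else num + bump
termination_by (num + 1 - p).toNat
decreasing_by
  omega

def maximum69Number_alt (num : Int) : Int :=
  pvLoopB num 1 0

-- ===== PRECONDITION & SPEC =====
-- Pre_ excludes negative num, on which A raises ValueError (int('-') on the sign character).
def Pre_maximum69Number (num : Int) : Prop := 0 ≤ num
instance (num : Int) : Decidable (Pre_maximum69Number num) := by unfold Pre_maximum69Number; infer_instance
def pvWitness_maximum69Number : Int := (9669)

def Spec_maximum69Number (num : Int) (out : Int) : Prop := out = maximum69Number_alt num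
instance (num : Int) (out : Int) : Decidable (Spec_maximum69Number num out) := by unfold Spec_maximum69Number; infer_instance

-- ===== CLAIM (what is proved, stated in full; the proofs are below) =====
def Claim_equal_maximum69Number : Prop := ∀ (num : Int), Dom_maximum69Number num → Pre_maximum69Number num → Spec_maximum69Number num (maximum69Number num)

-- ===== LEMMAS AND PROOFS =====

-- digit characters and their int() value
def pvDigs : List Char := ['0','1','2','3','4','5','6','7','8','9']
def pvDval (c : Char) : Int := (PySem.Int.ofChars? [c]).getD 0

-- replace the first '6' by '9' (char level / int level), positional value (MSB first)
def pvRep6C : List Char → List Char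
  | [] => []
  | c :: t => if c = '6' then '9' :: t else c :: pvRep6C t
def pvRep6 : List Int → List Int
  | [] => []
  | d :: t => if d = 6 then 9 :: t else d :: pvRep6 t
def pvPval : List Int → Int
  | [] => 0
  | d :: t => d * 10 ^ t.length + pvPval t

-- LSB-first positional value, and the bump B's loop computes (LSB-first digit list)
def pvPvalR : List Int → Int
  | [] => 0
  | d :: t => d + 10 * pvPvalR t
def pvBump : List Int → Int
  | [] => 0
  | d :: t => if pvBump t ≠ 0 then 10 * pvBump t else if d = 6 then 3 else 0

lemma pv_rep6C_length (cs : List Char) : (pvRep6C cs).length = cs.length := by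
  induction cs with
  | nil => rfl
  | cons c t ih =>
    rw [pvRep6C]
    by_cases h : c = '6' <;> simp [h, ih]

lemma pv_digitChar_mem (m : Nat) (h : m < 10) : Nat.digitChar m ∈ pvDigs := by
  interval_cases m <;> decide

lemma pv_toDigitsCore_digits (fuel : Nat) : ∀ (n : Nat) (acc : List Char),
    (∀ c ∈ acc, c ∈ pvDigs) → ∀ c ∈ Nat.toDigitsCore 10 fuel n acc, c ∈ pvDigs := by
  induction fuel with
  | zero => intro n acc hacc c hc; exact hacc c hc
  | succ f ih =>
    intro n acc hacc c hc
    simp only [Nat.toDigitsCore] at hc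
    by_cases h : n / 10 = 0
    · simp only [h] at hc
      rcases List.mem_cons.mp hc with h6 | h6
      · subst h6; exact pv_digitChar_mem _ (Nat.mod_lt _ (by norm_num))
      · exact hacc c h6
    · simp only [h] at hc
      refine ih (n / 10) _ ?_ c hc
      intro d hd
      rcases List.mem_cons.mp hd with h6 | h6
      · subst h6; exact pv_digitChar_mem _ (Nat.mod_lt _ (by norm_num))
      · exact hacc d h6

lemma pv_toChars_digits (num : Int) (h : 0 ≤ num) :
    ∀ c ∈ PySem.Int.toChars num, c ∈ pvDigs := by
  intro c hc
  unfold PySem.Int.toChars at hc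
  rw [if_neg (by omega)] at hc
  exact pv_toDigitsCore_digits _ _ _ (by intro d hd; cases hd) c hc

lemma pv_dval_six {c : Char} (h : c ∈ pvDigs) : pvDval c = 6 ↔ c = '6' := by
  fin_cases h <;> simp [pvDval] <;> decide

lemma pv_dval_range {c : Char} (h : c ∈ pvDigs) : 0 ≤ pvDval c ∧ pvDval c < 10 := by
  fin_cases h <;> simp [pvDval] <;> decide

-- enumerate unfolding
lemma pv_enum_cons (c : Char) (t : List Char) (s : Int) :
    PySem.List.enumerate (c :: t) s = (s, c) :: PySem.List.enumerate t (s + 1) := rfl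

-- A's loop, folded over enumerate, computes the positional value of the rep6'd digit list
lemma pv_A_loop (count : Int) :
    ∀ (cs : List Char), (∀ c ∈ cs, c ∈ pvDigs) →
    ∀ (s ans : Int) (flag : Bool), s + cs.length = count →
    (PySem.List.enumerate cs s).foldl
      (fun (st : Int × Bool) (p : Int × Char) =>
        if p.2 = '6' ∧ st.2 = false then
          (st.1 + 9 * 10 ^ ((count - p.1 - 1).toNat), true)
        else
          (st.1 + (PySem.Int.ofChars? [p.2]).getD 0 * 10 ^ ((count - p.1 - 1).toNat), st.2))
      (ans, flag)
    = (ans + (if flag then pvPval (cs.map pvDval) else pvPval ((pvRep6C cs).map pvDval)),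
       flag || cs.any (· = '6')) := by
  intro cs
  induction cs with
  | nil =>
    intro _ s ans flag _
    simp [pvPval, pvRep6C]
  | cons c t ih =>
    intro hd s ans flag hs
    have hexp : (count - s - 1).toNat = t.length := by
      simp only [List.length_cons] at hs; omega
    have hdt : ∀ x ∈ t, x ∈ pvDigs := fun x hx => hd x (List.mem_cons_of_mem _ hx)
    rw [pv_enum_cons, List.foldl_cons]
    by_cases hb : c = '6' ∧ flag = false
    · rw [if_pos (by simpa using hb)]
      rw [ih hdt (s + 1) _ true (by simp only [List.length_cons] at hs ⊢; omega)]
      obtain ⟨hc6, hf⟩ := hb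
      subst hc6 hf
      have h9 : pvDval '9' = 9 := by decide
      simp [pvRep6C, pvPval, hexp, h9, List.any_cons]
      ring
    · rw [if_neg (by simpa using hb)]
      rw [ih hdt (s + 1) _ flag (by simp only [List.length_cons] at hs ⊢; omega)]
      cases flag with
      | true =>
        simp [pvPval, pvDval, hexp, List.any_cons]; ring
      | false =>
        have hc6 : c ≠ '6' := by
          intro h; exact hb ⟨h, rfl⟩
        simp [pvRep6C, pvPval, pvDval, hexp, List.any_cons, hc6, pv_rep6C_length]
        ring

lemma pv_A_eq (num : Int) (h : 0 ≤ num) :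
    maximum69Number num = pvPval ((pvRep6C (PySem.Int.toChars num)).map pvDval) := by
  unfold maximum69Number
  have hmap := PySem.List.enumerate_eq_map_pyRange (PySem.Int.toChars num) ' '
  have hfold :
      (PySem.List.pyRange 0 (PySem.List.len (PySem.Int.toChars num)) 1).foldl
        (fun (st : Int × Bool) i =>
          let c := PySem.List.pyGetD (PySem.Int.toChars num) i ' '
          if c = '6' ∧ st.2 = false then
            (st.1 + 9 * 10 ^ ((PySem.List.len (PySem.Int.toChars num) - i - 1).toNat), true)
          else
            (st.1 + (PySem.Int.ofChars? [c]).getD 0 *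
              10 ^ ((PySem.List.len (PySem.Int.toChars num) - i - 1).toNat), st.2))
        ((0 : Int), false)
      = (PySem.List.enumerate (PySem.Int.toChars num) 0).foldl
        (fun (st : Int × Bool) (p : Int × Char) =>
          if p.2 = '6' ∧ st.2 = false then
            (st.1 + 9 * 10 ^ ((PySem.List.len (PySem.Int.toChars num) - p.1 - 1).toNat), true)
          else
            (st.1 + (PySem.Int.ofChars? [p.2]).getD 0 *
              10 ^ ((PySem.List.len (PySem.Int.toChars num) - p.1 - 1).toNat), st.2))
        ((0 : Int), false) := by
    rw [hmap, List.foldl_map]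
  simp only []
  rw [hfold,
    pv_A_loop (PySem.List.len (PySem.Int.toChars num)) (PySem.Int.toChars num)
      (pv_toChars_digits num h) 0 0 false (by simp [PySem.List.len_eq])]
  simp

-- rep6 commutes with taking digit values
lemma pv_rep6_map (cs : List Char) (hd : ∀ c ∈ cs, c ∈ pvDigs) :
    (pvRep6C cs).map pvDval = pvRep6 (cs.map pvDval) := by
  induction cs with
  | nil => rfl
  | cons c t ih =>
    have hc := hd c List.mem_cons_self
    have hdt : ∀ x ∈ t, x ∈ pvDigs := fun x hx => hd x (List.mem_cons_of_mem _ hx)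
    by_cases h6 : c = '6'
    · subst h6
      rw [pvRep6C, if_pos rfl]
      simp only [List.map_cons, pvRep6]
      rw [if_pos (by decide)]
      have : pvDval '9' = 9 := by decide
      rw [this]
    · rw [pvRep6C, if_neg h6]
      simp only [List.map_cons, pvRep6]
      rw [if_neg (fun hv => h6 ((pv_dval_six hc).mp hv)), ih hdt]

-- ===== B-side: LSB-first values, the bump, and the loop invariant =====

lemma pv_pvalR_append (xs : List Int) (d : Int) :
    pvPvalR (xs ++ [d]) = pvPvalR xs + d * 10 ^ xs.length := by
  induction xs with
  | nil => simp [pvPvalR]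
  | cons x t ih => simp [pvPvalR, ih, pow_succ]; ring

lemma pv_pvalR_reverse (ds : List Int) : pvPvalR ds.reverse = pvPval ds := by
  induction ds with
  | nil => rfl
  | cons d t ih =>
    simp only [List.reverse_cons, pv_pvalR_append, pvPval, ih, List.length_reverse]
    ring

lemma pv_bump_cons (x : Int) (xs : List Int) :
    pvBump (x :: xs) = if pvBump xs ≠ 0 then 10 * pvBump xs else if x = 6 then 3 else 0 := rfl

lemma pv_bump_append (xs : List Int) (d : Int) :
    pvBump (xs ++ [d]) = if d = 6 then 3 * 10 ^ xs.length else pvBump xs := by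
  induction xs with
  | nil => by_cases h : d = 6 <;> simp [pvBump, h]
  | cons x t ih =>
    rw [List.cons_append, pv_bump_cons, ih, pv_bump_cons]
    by_cases h : d = 6
    · rw [if_pos h, if_pos h, if_pos (by positivity), List.length_cons, pow_succ]
      ring
    · rw [if_neg h, if_neg h]

lemma pv_rep6_length (ds : List Int) : (pvRep6 ds).length = ds.length := by
  induction ds with
  | nil => rfl
  | cons a s ih =>
    rw [pvRep6]
    by_cases ha : a = 6 <;> simp [ha, ih]

-- replacing the first 6 (MSB side) adds exactly the bump of the reversed list
lemma pv_rep6_pval (ds : List Int) :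
    pvPval (pvRep6 ds) = pvPval ds + pvBump ds.reverse := by
  induction ds with
  | nil => rfl
  | cons d t ih =>
    rw [List.reverse_cons, pv_bump_append]
    by_cases h : d = 6
    · subst h
      rw [if_pos rfl, pvRep6, if_pos rfl]
      simp only [pvPval, List.length_reverse]
      ring
    · rw [if_neg h, pvRep6, if_neg h]
      simp only [pvPval, pv_rep6_length, ih]
      ring

lemma pv_pvalR_pos (rds : List Int) (hval : ∀ d ∈ rds, 0 ≤ d ∧ d < 10)
    (hlast : ∀ x, rds.getLast? = some x → x ≠ 0) (hne : rds ≠ []) :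
    1 ≤ pvPvalR rds := by
  induction rds with
  | nil => exact absurd rfl hne
  | cons d t ih =>
    cases t with
    | nil =>
      have hd := hval d List.mem_cons_self
      have := hlast d rfl
      simp only [pvPvalR]
      omega
    | cons b s =>
      have h1 : 1 ≤ pvPvalR (b :: s) := by
        refine ih (fun x hx => hval x (List.mem_cons_of_mem _ hx)) ?_ (by simp)
        intro x hx
        exact hlast x (by rw [List.getLast?_cons_cons]; exact hx)
      have hd := hval d List.mem_cons_self
      simp only [pvPvalR] at h1 ⊢
      omega

lemma pv_pvalR_nonneg (rds : List Int) (hval : ∀ d ∈ rds, 0 ≤ d ∧ d < 10) :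
    0 ≤ pvPvalR rds := by
  induction rds with
  | nil => simp [pvPvalR]
  | cons d t ih =>
    have hd := hval d List.mem_cons_self
    have ht := ih (fun x hx => hval x (List.mem_cons_of_mem _ hx))
    simp only [pvPvalR]
    omega

-- B's while loop: num fixed, p sweeps the powers of ten through the digits rds (LSB first)
lemma pv_loop_spec (rds : List Int) (hval : ∀ d ∈ rds, 0 ≤ d ∧ d < 10)
    (hlast : ∀ x, rds.getLast? = some x → x ≠ 0) :
    ∀ (M p bump : Int), 1 ≤ p → 0 ≤ M → M < p →
    pvLoopB (M + p * pvPvalR rds) p bump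
      = (M + p * pvPvalR rds) + (if pvBump rds = 0 then bump else p * pvBump rds) := by
  induction rds with
  | nil =>
    intro M p bump hp hM0 hMp
    rw [pvLoopB, dif_neg (by simp only [pvPvalR]; omega)]
    simp [pvBump]
  | cons d t ih =>
    intro M p bump hp hM0 hMp
    have hd := hval d List.mem_cons_self
    have hvt : ∀ x ∈ t, 0 ≤ x ∧ x < 10 := fun x hx => hval x (List.mem_cons_of_mem _ hx)
    have hV0 : 0 ≤ pvPvalR t := pv_pvalR_nonneg t hvt
    -- d + 10 * pvPvalR t ≥ 1
    have hval1 : 1 ≤ d + 10 * pvPvalR t := by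
      cases t with
      | nil =>
        have := hlast d rfl
        simp only [pvPvalR]
        omega
      | cons b s =>
        have h1 : 1 ≤ pvPvalR (b :: s) := by
          refine pv_pvalR_pos (b :: s) (fun x hx => hval x (List.mem_cons_of_mem _ hx)) ?_ (by simp)
          intro x hx
          exact hlast x (by rw [List.getLast?_cons_cons]; exact hx)
        omega
    have hnum : M + p * pvPvalR (d :: t) = (M + p * d) + (p * 10) * pvPvalR t := by
      simp only [pvPvalR]; ring
    have hguard : p ≤ M + p * pvPvalR (d :: t) := by
      have h1 : p * 1 ≤ p * pvPvalR (d :: t) := by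
        apply mul_le_mul_of_nonneg_left _ (by omega)
        simpa only [pvPvalR] using hval1
      omega
    -- the digit the loop reads at p is d
    have hdig : PySem.Int.mod (PySem.Int.floordiv (M + p * pvPvalR (d :: t)) p) 10 = d := by
      have hfd : PySem.Int.floordiv (M + p * pvPvalR (d :: t)) p = pvPvalR (d :: t) := by
        rw [PySem.Int.floordiv_eq_ediv_of_pos (by omega)]
        rw [Int.add_mul_ediv_left _ _ (by omega : p ≠ 0), Int.ediv_eq_zero_of_lt hM0 hMp]
        ring
      rw [hfd, PySem.Int.mod_eq_emod_of_pos (by norm_num)]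
      show (d + 10 * pvPvalR t) % 10 = d
      omega
    rw [pvLoopB, dif_pos ⟨hp, hguard⟩, hdig, hnum,
      ih hvt (fun x hx => by
          cases t with
          | nil => cases hx
          | cons b s => exact hlast x (by rw [List.getLast?_cons_cons]; exact hx))
        (M + p * d) (p * 10) _ (by omega) (by have h2 : 0 ≤ p * d := mul_nonneg (by omega) hd.1; omega)
        (by have : p * (d + 1) ≤ p * 10 := mul_le_mul_of_nonneg_left (by omega) (by omega)
            nlinarith)]
    by_cases hbt : pvBump t = 0
    · by_cases hd6 : d = 6
      · rw [if_pos hbt]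
        have hb : pvBump (d :: t) = 3 := by rw [pvBump, if_neg (by omega), if_pos hd6]
        rw [hb, if_pos hd6, if_neg (by norm_num)]
        ring
      · rw [if_pos hbt]
        have hb : pvBump (d :: t) = 0 := by rw [pvBump, if_neg (by omega), if_neg hd6]
        rw [hb, if_neg hd6, if_pos rfl]
    · have hb : pvBump (d :: t) = 10 * pvBump t := by rw [pvBump, if_pos hbt]
      rw [if_neg hbt, hb, if_neg (by omega)]
      ring

-- roundtrip: the positional value of str(n)'s digit characters is n
lemma pv_dval_digitChar (m : Nat) (h : m < 10) : pvDval (Nat.digitChar m) = (m : Int) := by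
  interval_cases m <;> decide

lemma pv_toDigitsCore_val (fuel : Nat) : ∀ (n : Nat) (acc : List Char), n < fuel →
    pvPval ((Nat.toDigitsCore 10 fuel n acc).map pvDval)
      = (n : Int) * 10 ^ acc.length + pvPval (acc.map pvDval) := by
  induction fuel with
  | zero => intro n acc h; omega
  | succ f ih =>
    intro n acc h
    by_cases h0 : n / 10 = 0
    · rw [show Nat.toDigitsCore 10 (f + 1) n acc = (n % 10).digitChar :: acc from by
        simp [Nat.toDigitsCore, h0]]
      have hn : n < 10 := by omega
      simp only [List.map_cons, pvPval, List.length_map]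
      rw [pv_dval_digitChar _ (Nat.mod_lt _ (by norm_num))]
      have : n % 10 = n := by omega
      rw [this]
    · rw [show Nat.toDigitsCore 10 (f + 1) n acc
            = Nat.toDigitsCore 10 f (n / 10) ((n % 10).digitChar :: acc) from by
          simp [Nat.toDigitsCore, h0]]
      rw [ih (n / 10) _ (by omega)]
      simp only [List.length_cons, List.map_cons, pvPval, List.length_map]
      rw [pv_dval_digitChar _ (Nat.mod_lt _ (by norm_num))]
      have hnm : (n : Int) = 10 * ((n / 10 : Nat) : Int) + ((n % 10 : Nat) : Int) := by
        push_cast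
        omega
      rw [pow_succ, hnm]
      ring

-- str(n) has a nonzero leading digit for n ≥ 1
lemma pv_toDigitsCore_head (fuel : Nat) : ∀ (n : Nat) (acc : List Char), 0 < n → n < fuel →
    ∃ c rest, Nat.toDigitsCore 10 fuel n acc = c :: rest ∧ pvDval c ≠ 0 := by
  induction fuel with
  | zero => intro n acc h hf; omega
  | succ f ih =>
    intro n acc h hf
    by_cases h0 : n / 10 = 0
    · refine ⟨Nat.digitChar (n % 10), acc, by simp [Nat.toDigitsCore, h0], ?_⟩
      have h1 : n < 10 := by omega
      have h2 : n % 10 = n := by omega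
      rw [h2, pv_dval_digitChar _ h1]
      omega
    · rw [show Nat.toDigitsCore 10 (f + 1) n acc
            = Nat.toDigitsCore 10 f (n / 10) ((n % 10).digitChar :: acc) from by
          simp [Nat.toDigitsCore, h0]]
      exact ih (n / 10) _ (by omega) (by omega)

-- assembling B for positive num
lemma pv_B_eq (num : Int) (h : 1 ≤ num) :
    maximum69Number_alt num
      = pvPval ((PySem.Int.toChars num).map pvDval)
        + pvBump ((PySem.Int.toChars num).map pvDval).reverse := by
  set ds := (PySem.Int.toChars num).map pvDval with hds
  have hchars : ∀ c ∈ PySem.Int.toChars num, c ∈ pvDigs := pv_toChars_digits num (by omega)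
  have hval : ∀ d ∈ ds.reverse, 0 ≤ d ∧ d < 10 := by
    intro d hd
    rw [List.mem_reverse, hds, List.mem_map] at hd
    obtain ⟨c, hc, hcd⟩ := hd
    rw [← hcd]
    exact pv_dval_range (hchars c hc)
  -- leading digit nonzero
  have hhead : ∃ c rest, PySem.Int.toChars num = c :: rest ∧ pvDval c ≠ 0 := by
    unfold PySem.Int.toChars
    rw [if_neg (by omega)]
    exact pv_toDigitsCore_head _ _ [] (by omega) (by omega)
  obtain ⟨c, rest, hcr, hc0⟩ := hhead
  have hlast : ∀ x, ds.reverse.getLast? = some x → x ≠ 0 := by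
    intro x hx
    rw [List.getLast?_reverse, hds, hcr, List.map_cons, List.head?_cons] at hx
    rw [show x = pvDval c from (Option.some_inj.mp hx).symm]
    exact hc0
  -- the roundtrip value
  have hpv : pvPval ds = num := by
    rw [hds]
    unfold PySem.Int.toChars
    rw [if_neg (by omega)]
    show pvPval ((Nat.toDigitsCore 10 (num.toNat + 1) num.toNat []).map pvDval) = num
    rw [pv_toDigitsCore_val (num.toNat + 1) num.toNat [] (by omega)]
    simp [pvPval]
    omega
  have hrt : pvPvalR ds.reverse = num := by rw [pv_pvalR_reverse]; exact hpv
  have hloop := pv_loop_spec ds.reverse hval hlast 0 1 0 le_rfl le_rfl (by norm_num)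
  rw [hrt] at hloop
  rw [show (0 : Int) + 1 * num = num by ring] at hloop
  show pvLoopB num 1 0 = pvPval ds + pvBump ds.reverse
  rw [hloop, hpv]
  by_cases hb : pvBump ds.reverse = 0
  · rw [if_pos hb, hb]
  · rw [if_neg hb]; ring

-- ===== VERDICT (by name: the statement is the Claim_ definition above) =====
theorem maximum69Number_spec : Claim_equal_maximum69Number := by
  intro num _ hpre
  unfold Spec_maximum69Number
  rcases eq_or_lt_of_le hpre with h0 | h1
  · rw [← h0]
    have hb : maximum69Number_alt 0 = 0 := by
      unfold maximum69Number_alt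
      rw [pvLoopB]
      norm_num
    rw [hb]
    decide
  · rw [pv_A_eq num hpre, pv_rep6_map _ (pv_toChars_digits num hpre), pv_rep6_pval,
      pv_B_eq num h1]
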